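-- pv_equiv track=rewrite | github.com/3582730951/vmprotect | core/wrapper/weaver_proxy.py | _detect_target_flags
-- ===== SOURCE A (Python) =====
-- from typing import Dict, List, Mapping, Optional, Sequence
--
-- def _detect_target_flags(args: Sequence[str]) -> List[str]:
--     result: List[str] = []
--     i = 0
--     while i < len(args):
--         token = args[i]
--         if token in {"-target", "--target"} and i + 1 < len(args):
--             result.extend([token, args[i + 1]])
--             i += 2
--             continue
--         if token.startswith("--target="):
--             result.append(token)
--         i += 1
--     return result
-- ===== SOURCE B (Python) =====
-- from typing import List, Sequence
--
-- def _detect_target_flags(args: Sequence[str]) -> List[str]: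
--     result: List[str] = []
--     pending = None
--     for token in args:
--         if pending is not None:
--             result.extend([pending, token])
--             pending = None
--         elif token in ("-target", "--target"):
--             pending = token
--         elif token.startswith("--target="):
--             result.append(token)
--     return result
-- ===== Notes on version B (the rewrite author's own statement) =====
-- stated objective: simpler
-- what changed: Replaces the index/lookahead while loop (i += 2 consumption) by a single for-loop state machine that remembers a pending flag and emits it with the next token (a trailing pending flag is never flushed).
import Mathlib
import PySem

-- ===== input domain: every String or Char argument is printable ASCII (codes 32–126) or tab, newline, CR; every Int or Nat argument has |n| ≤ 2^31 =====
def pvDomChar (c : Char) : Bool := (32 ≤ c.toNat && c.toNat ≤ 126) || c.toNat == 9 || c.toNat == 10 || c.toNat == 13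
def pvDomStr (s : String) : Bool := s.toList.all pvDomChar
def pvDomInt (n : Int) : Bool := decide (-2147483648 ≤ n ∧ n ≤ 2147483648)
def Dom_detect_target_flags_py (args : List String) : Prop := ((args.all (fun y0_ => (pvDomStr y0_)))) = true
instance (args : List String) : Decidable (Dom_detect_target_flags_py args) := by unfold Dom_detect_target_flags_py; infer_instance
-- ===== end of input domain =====

-- B replaces A's index/lookahead while loop by a lookbehind for-loop with a pending flag; same values, simpler control flow (return value equivalence; neither mutates its argument).

-- ===== PORT A =====
-- A's while loop over the index i, with lookahead args[i+1] and i += 2 consumption.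
def pvAisFlag (t : String) : Bool := t == "-target" || t == "--target"

def detect_target_flags_py_go (args : List String) (i : Nat) : List String :=
  if h : i < args.length then
    let token := args[i]
    if pvAisFlag token && decide (i + 1 < args.length) then
      token :: args.getD (i + 1) "" :: detect_target_flags_py_go args (i + 2)
    else if PySem.Str.startswith token "--target=" then
      token :: detect_target_flags_py_go args (i + 1)
    else
      detect_target_flags_py_go args (i + 1)
  else
    []
termination_by args.length - i

def detect_target_flags_py (args : List String) : List String :=
  detect_target_flags_py_go args 0

-- ===== PORT B =====
-- B's for-loop: fold over tokens carrying (result, pending).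
def detect_target_flags_py_alt_step (st : List String × Option String) (token : String) :
    List String × Option String :=
  match st.2 with
  | some p => (st.1 ++ [p, token], none)
  | none =>
    if pvAisFlag token then (st.1, some token)
    else if PySem.Str.startswith token "--target=" then (st.1 ++ [token], none)
    else (st.1, none)

def detect_target_flags_py_alt (args : List String) : List String :=
  (args.foldl detect_target_flags_py_alt_step ([], none)).1

-- ===== PRECONDITION & SPEC =====
def Spec_detect_target_flags_py (args : List String) (out : List String) : Prop := out = detect_target_flags_py_alt args
instance (args : List String) (out : List String) : Decidable (Spec_detect_target_flags_py args out) := by unfold Spec_detect_target_flags_py; infer_instance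

-- ===== CLAIM (what is proved, stated in full; the proofs are below) =====
def Claim_equal_detect_target_flags_py : Prop := ∀ (args : List String), Dom_detect_target_flags_py args → Spec_detect_target_flags_py args (detect_target_flags_py args)

-- ===== LEMMAS AND PROOFS =====

-- List-structured form of A's loop (proved equal to the index form below).
def pvGoL : List String → List String
  | [] => []
  | t :: rest =>
    if pvAisFlag t then
      match rest with
      | v :: rest' => t :: v :: pvGoL rest'
      | [] => []
    else if PySem.Str.startswith t "--target=" then t :: pvGoL rest
    else pvGoL rest

lemma pvAisFlag_not_startswith {t : String} (h : pvAisFlag t = true) :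
    PySem.Chars.startswith t.toList ['-', '-', 't', 'a', 'r', 'g', 'e', 't', '='] = false := by
  simp only [pvAisFlag, Bool.or_eq_true, beq_iff_eq] at h
  rcases h with h | h <;> subst h <;> decide

lemma pvGo_eq_goL (args : List String) (i : Nat) :
    detect_target_flags_py_go args i = pvGoL (args.drop i) := by
  by_cases h : i < args.length
  · rw [List.drop_eq_getElem_cons h]
    by_cases hf : pvAisFlag args[i]
    · by_cases h2 : i + 1 < args.length
      · rw [List.drop_eq_getElem_cons h2]
        rw [detect_target_flags_py_go]
        simp [h, hf, h2, List.getD,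
          pvGo_eq_goL args (i + 2), pvGoL]
      · have hd : args.drop (i + 1) = [] := by
          apply List.drop_eq_nil_of_le; omega
        rw [detect_target_flags_py_go]
        simp [h, hf, h2, PySem.Str.startswith, pvAisFlag_not_startswith hf,
          pvGo_eq_goL args (i + 1), hd, pvGoL]
    · rw [detect_target_flags_py_go]
      simp only [h, dif_pos, hf, Bool.false_and, if_neg (Bool.false_ne_true),
        pvGo_eq_goL args (i + 1)]
      conv_rhs => rw [pvGoL.eq_def]
      simp only [hf, Bool.false_eq_true, if_false]
  · have hd : args.drop i = [] := by apply List.drop_eq_nil_of_le; omega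
    rw [detect_target_flags_py_go]
    simp [h, hd, pvGoL]
termination_by args.length - i

-- B's fold, characterised for both pending states, relates to pvGoL.
lemma pvFold_char (l : List String) :
    (∀ acc : List String,
        (l.foldl detect_target_flags_py_alt_step (acc, none)).1 = acc ++ pvGoL l) ∧
    (∀ (acc : List String) (p : String), pvAisFlag p = true →
        (l.foldl detect_target_flags_py_alt_step (acc, some p)).1 =
          acc ++ (match l with
                  | [] => []
                  | t :: rest => p :: t :: pvGoL rest)) := by
  induction l with
  | nil => simp [pvGoL]
  | cons t rest ih =>
    constructor
    · intro acc
      by_cases hf : pvAisFlag t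
      · simp only [List.foldl_cons, detect_target_flags_py_alt_step, hf, if_pos]
        rw [ih.2 acc t hf]
        cases rest <;> simp [pvGoL, hf]
      · by_cases hs : PySem.Str.startswith t "--target="
        · simp only [List.foldl_cons, detect_target_flags_py_alt_step, hf,
            Bool.false_eq_true, if_false, hs, if_pos]
          rw [ih.1 (acc ++ [t])]
          conv_rhs => rw [pvGoL.eq_def]
          simp only [hf, Bool.false_eq_true, if_false]
          rw [if_pos hs]
          simp
        · simp only [List.foldl_cons, detect_target_flags_py_alt_step, hf,
            Bool.false_eq_true, if_false, hs, if_false]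
          rw [ih.1 acc]
          conv_rhs => rw [pvGoL.eq_def]
          simp only [hf, Bool.false_eq_true, if_false]
          rw [if_neg hs]
    · intro acc p _
      simp only [List.foldl_cons, detect_target_flags_py_alt_step]
      rw [ih.1 (acc ++ [p, t])]
      simp

-- ===== VERDICT (by name: the statement is the Claim_ definition above) =====
theorem detect_target_flags_py_spec : Claim_equal_detect_target_flags_py := by
  intro args _
  unfold Spec_detect_target_flags_py detect_target_flags_py detect_target_flags_py_alt
  rw [pvGo_eq_goL args 0, (pvFold_char args).1 []]
  simp
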